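-- pv_equiv track=rewrite | github.com/licongwell/sentry-dingding | src/sentry_dingding/plugin.py | regularInMessage
-- ===== SOURCE A (Python) =====
-- def regularInMessage (inputSrt, message):
--     if (bool(inputSrt)):
--         strArr = inputSrt.split("||")
--         for item in strArr:
--             if item in message:
--                 return True
--     else:
--         return False
-- ===== SOURCE B (Python) =====
-- def regularInMessage(inputSrt, message):
--     # Position-major scan: walk every start position of message once and test
--     # each token with startswith, instead of one full substring search per token.
--     if not inputSrt:
--         return False
--     tokens = inputSrt.split("||")
--     for i in range(len(message) + 1):
--         suffix = message[i:]
--         for tok in tokens: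
--             if suffix.startswith(tok):
--                 return True
-- ===== Notes on version B (the rewrite author's own statement) =====
-- stated objective: alternative
-- what changed: B replaces A's token-major loop of independent 'item in message' substring searches by a position-major scan of the message: for each start position it tests every token with startswith, so the 'in' operator disappears entirely.
import Mathlib
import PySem

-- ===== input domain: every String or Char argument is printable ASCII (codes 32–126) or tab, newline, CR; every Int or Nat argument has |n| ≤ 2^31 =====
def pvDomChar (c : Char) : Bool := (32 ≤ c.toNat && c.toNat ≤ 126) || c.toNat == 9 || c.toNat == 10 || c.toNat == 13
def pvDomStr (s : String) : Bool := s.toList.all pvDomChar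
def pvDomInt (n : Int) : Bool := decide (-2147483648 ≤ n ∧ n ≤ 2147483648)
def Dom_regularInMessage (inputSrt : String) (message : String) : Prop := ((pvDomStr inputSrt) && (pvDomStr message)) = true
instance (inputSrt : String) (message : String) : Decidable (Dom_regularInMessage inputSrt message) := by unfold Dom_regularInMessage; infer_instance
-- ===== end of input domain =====

-- B is an alternative algorithm: a position-major scan of message testing each token
-- with startswith, instead of A's token-major independent 'in' substring searches.

-- ===== PORT A =====
-- 'for item in strArr: if item in message: return True' (falls through to None)
def pvLoopA : List String → String → Option Bool
  | [], _ => none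
  | item :: rest, message =>
      if PySem.Str.isIn item message then some true else pvLoopA rest message

def regularInMessage (inputSrt : String) (message : String) : Option Bool :=
  if inputSrt ≠ "" then  -- bool(inputSrt)
    -- split? is 'some' here since the separator "||" is nonempty
    pvLoopA ((PySem.Str.split? inputSrt "||").getD []) message
  else some false

-- ===== PORT B =====
-- inner loop: 'for tok in tokens: if suffix.startswith(tok): return True'
def pvInnerB : List String → String → Option Bool
  | [], _ => none
  | tok :: rest, suffix =>
      if PySem.Str.startswith suffix tok then some true else pvInnerB rest suffix

-- outer loop: 'for i in range(len(message) + 1): suffix = message[i:]; …'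
def pvOuterB : List Int → List String → String → Option Bool
  | [], _, _ => none
  | i :: rest, tokens, message =>
      match pvInnerB tokens (PySem.Str.slice message (some i) none) with
      | some true => some true
      | _ => pvOuterB rest tokens message

def regularInMessage_alt (inputSrt : String) (message : String) : Option Bool :=
  if inputSrt = "" then some false
  else
    pvOuterB (PySem.List.pyRange 0 (PySem.Str.len message + 1) 1)
      ((PySem.Str.split? inputSrt "||").getD []) message

-- ===== PRECONDITION & SPEC =====
def Spec_regularInMessage (inputSrt : String) (message : String) (out : Option Bool) : Prop := out = regularInMessage_alt inputSrt message
instance (inputSrt : String) (message : String) (out : Option Bool) : Decidable (Spec_regularInMessage inputSrt message out) := by unfold Spec_regularInMessage; infer_instance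

-- ===== CLAIM (what is proved, stated in full; the proofs are below) =====
def Claim_equal_regularInMessage : Prop := ∀ (inputSrt : String) (message : String), Dom_regularInMessage inputSrt message → Spec_regularInMessage inputSrt message (regularInMessage inputSrt message)

-- ===== LEMMAS AND PROOFS =====

theorem infix_iff_exists_drop {α : Type} (t l : List α) :
    t <:+: l ↔ ∃ i ≤ l.length, t <+: l.drop i := by
  constructor
  · rintro ⟨s, u, rfl⟩
    refine ⟨s.length, by simp, ?_⟩
    simp [List.append_assoc]
  · rintro ⟨i, _, hp⟩
    exact hp.isInfix.trans (List.drop_suffix i l).isInfix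

theorem pvLoopA_eq (toks : List String) (msg : String) :
    pvLoopA toks msg =
      if ∃ t ∈ toks, t.toList <:+: msg.toList then some true else none := by
  induction toks with
  | nil => simp [pvLoopA]
  | cons item rest ih =>
      simp only [pvLoopA, ih, PySem.Str.isIn_eq]
      by_cases h : item.toList <:+: msg.toList
      · simp [h, PySem.Chars.isIn_iff_infix]
      · simp only [List.mem_cons, exists_eq_or_imp, h, false_or]
        rw [if_neg (by simp [PySem.Chars.isIn_iff_infix, h])]

theorem pvInnerB_eq (toks : List String) (suf : String) :
    pvInnerB toks suf =
      if ∃ t ∈ toks, t.toList <+: suf.toList then some true else none := by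
  induction toks with
  | nil => simp [pvInnerB]
  | cons tok rest ih =>
      simp only [pvInnerB, ih, PySem.Str.startswith_eq]
      by_cases h : tok.toList <+: suf.toList
      · simp [h, PySem.Chars.startswith_iff]
      · simp only [List.mem_cons, exists_eq_or_imp, h, false_or]
        rw [if_neg (by simp [PySem.Chars.startswith_iff, h])]

theorem pvOuterB_eq (ixs : List Int) (toks : List String) (msg : String) :
    pvOuterB ixs toks msg =
      if ∃ i ∈ ixs, ∃ t ∈ toks,
          t.toList <+: (PySem.Str.slice msg (some i) none).toList then some true
      else none := by
  induction ixs with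
  | nil => simp [pvOuterB]
  | cons i rest ih =>
      simp only [pvOuterB, pvInnerB_eq, ih, List.mem_cons, exists_eq_or_imp]
      by_cases h : ∃ t ∈ toks, t.toList <+: (PySem.Str.slice msg (some i) none).toList
      · rw [if_pos h, if_pos (Or.inl h)]
      · rw [if_neg h]
        simp only [h, false_or]

theorem slice_drop (msg : String) (i : Int) (h : 0 ≤ i) :
    (PySem.Str.slice msg (some i) none).toList = msg.toList.drop i.toNat := by
  rw [PySem.Str.toList_slice, PySem.Chars.slice_eq_listSlice, PySem.List.slice_from _ h]

-- ===== VERDICT =====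
theorem regularInMessage_spec : Claim_equal_regularInMessage := by
  intro inputSrt message _
  unfold Spec_regularInMessage regularInMessage regularInMessage_alt
  by_cases hs : inputSrt = ""
  · simp [hs]
  · simp only [hs, ne_eq, not_false_eq_true, if_true, if_false]
    rw [pvLoopA_eq, pvOuterB_eq]
    congr 1
    apply propext
    constructor
    · rintro ⟨t, ht, hinf⟩
      obtain ⟨i, hi, hp⟩ := (infix_iff_exists_drop t.toList message.toList).mp hinf
      refine ⟨(i : Int), ?_, t, ht, ?_⟩
      · rw [PySem.List.mem_pyRange_one]
        simp only [PySem.Str.len_eq]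
        constructor
        · exact_mod_cast Int.natCast_nonneg i
        · omega
      · rw [slice_drop _ _ (by exact_mod_cast Int.natCast_nonneg i)]
        simpa using hp
    · rintro ⟨i, hi, t, ht, hp⟩
      rw [PySem.List.mem_pyRange_one] at hi
      rw [slice_drop _ _ hi.1] at hp
      refine ⟨t, ht, (infix_iff_exists_drop t.toList message.toList).mpr ⟨i.toNat, ?_, hp⟩⟩
      have := hi.2
      simp only [PySem.Str.len_eq] at this
      omega
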